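-- pv_equiv track=rewrite | github.com/okuribit333-lgtm/sol-screener-001 | src/scanner.py | _extract_handle
-- ===== SOURCE A (Python) =====
-- from typing import Optional
--
-- def _extract_handle(url: str) -> Optional[str]:
--     if not url:
--         return None
--     for prefix in [
--         "https://twitter.com/", "https://x.com/",
--         "http://twitter.com/", "http://x.com/",
--     ]:
--         if url.startswith(prefix):
--             h = url[len(prefix):].strip("/").split("?")[0]
--             return h if h else None
--     return None
-- ===== SOURCE B (Python) =====
-- from typing import Optional
--
-- def _extract_handle(url: str) -> Optional[str]:
--     scheme, s1, rest = url.partition("://")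
--     if not s1 or scheme not in ("http", "https"):
--         return None
--     host, s2, path = rest.partition("/")
--     if not s2 or host not in ("twitter.com", "x.com"):
--         return None
--     return path.strip("/").split("?")[0] or None
-- ===== Notes on version B (the rewrite author's own statement) =====
-- stated objective: idiomatic
-- what changed: Replaces the scan over four literal URL prefixes by two str.partition splits (scheme on '://', host on '/') with tuple-membership tests, keeping the same strip('/').split('?')[0] tail.
import Mathlib
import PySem

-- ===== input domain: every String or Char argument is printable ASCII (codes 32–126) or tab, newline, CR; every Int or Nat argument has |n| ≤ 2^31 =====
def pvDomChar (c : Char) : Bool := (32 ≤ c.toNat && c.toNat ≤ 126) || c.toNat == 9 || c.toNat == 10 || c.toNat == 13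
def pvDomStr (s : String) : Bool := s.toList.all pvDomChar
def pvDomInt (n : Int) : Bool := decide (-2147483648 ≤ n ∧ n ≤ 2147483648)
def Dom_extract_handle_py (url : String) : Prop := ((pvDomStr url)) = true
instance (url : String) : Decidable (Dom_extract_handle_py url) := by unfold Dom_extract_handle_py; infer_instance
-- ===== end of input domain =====

-- B replaces A's scan over four literal URL prefixes by two str.partition splits
-- (scheme on "://", host on "/") with membership tests; objective: idiomatic, same cost.

-- shared tail: `x.strip("/").split("?")[0]` then `h if h else None` / `or None`
-- (identical Python expression in A and B; split(sep) is never empty, so [0] is its head)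
def pvTail (t : List Char) : Option String :=
  let h := (PySem.Chars.splitOn (PySem.Chars.stripChars t ['/']) ['?']).headD []
  if h = [] then none else some (String.ofList h)

-- ===== PORT A =====
-- the `for prefix in [...]` loop; `url[len(prefix):]` with a nonnegative start is List.drop
def pvLoopA (l : List Char) : List String → Option String
  | [] => none
  | p :: ps =>
      if PySem.Chars.startswith l p.toList then pvTail (l.drop p.toList.length)
      else pvLoopA l ps

def extract_handle_py (url : String) : Option String :=
  if url.toList = [] then none
  else pvLoopA url.toList
    ["https://twitter.com/", "https://x.com/", "http://twitter.com/", "http://x.com/"]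

-- ===== PORT B =====
-- str.partition(sep): (part before the first occurrence, found?, part after); exact for sep ≠ ""
def pvPartition : List Char → List Char → List Char × Bool × List Char
  | [], _ => ([], false, [])
  | c :: rest, sep =>
      if sep.isPrefixOf (c :: rest) then ([], true, (c :: rest).drop sep.length)
      else
        let r := pvPartition rest sep
        (c :: r.1, r.2.1, r.2.2)

def extract_handle_py_alt (url : String) : Option String :=
  match pvPartition url.toList "://".toList with
  | (scheme, s1, rest) =>
    if s1 = false ∨ (scheme ≠ "http".toList ∧ scheme ≠ "https".toList) then none
    else
      match pvPartition rest "/".toList with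
      | (host, s2, path) =>
        if s2 = false ∨ (host ≠ "twitter.com".toList ∧ host ≠ "x.com".toList) then none
        else pvTail path

-- ===== PRECONDITION & SPEC =====
def Spec_extract_handle_py (url : String) (out : Option String) : Prop := out = extract_handle_py_alt url
instance (url : String) (out : Option String) : Decidable (Spec_extract_handle_py url out) := by unfold Spec_extract_handle_py; infer_instance

-- ===== CLAIM (what is proved, stated in full; the proofs are below) =====
def Claim_equal_extract_handle_py : Prop := ∀ (url : String), Dom_extract_handle_py url → Spec_extract_handle_py url (extract_handle_py url)

-- ===== LEMMAS AND PROOFS =====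

-- partition finds the separator right after p when the separator's first char does not occur in p
theorem pvPartition_of_prefix (p q sep' : List Char) (s0 : Char) (hnp : s0 ∉ p) :
    pvPartition (p ++ (s0 :: sep') ++ q) (s0 :: sep') = (p, true, q) := by
  induction p with
  | nil =>
      simp only [List.nil_append, pvPartition, List.cons_append]
      rw [if_pos (List.isPrefixOf_iff_prefix.mpr ⟨q, by simp⟩)]
      simp [show (s0 :: sep').length = sep'.length + 1 from rfl]
  | cons a p' ih =>
      have ha : a ≠ s0 := fun h => hnp (by simp [h])
      have hrec := ih (fun h => hnp (List.mem_cons_of_mem _ h))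
      simp only [List.cons_append, List.append_assoc] at hrec ⊢
      rw [pvPartition, if_neg]
      · simp [hrec]
      · intro hpf
        rcases List.isPrefixOf_iff_prefix.mp hpf with ⟨t, ht⟩
        exact ha (by injection ht with h1 _; exact h1.symm)

-- soundness: a successful partition decomposes the input around the separator
theorem pvPartition_sound (l sep p q : List Char) (h : pvPartition l sep = (p, true, q)) :
    l = p ++ sep ++ q := by
  induction l generalizing p q with
  | nil => simp [pvPartition] at h
  | cons c rest ih =>
      by_cases hpf : sep.isPrefixOf (c :: rest)
      · rw [pvPartition, if_pos hpf] at h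
        injection h with h1 h2; injection h2 with h2a h2b
        subst h1; subst h2b
        simpa using (List.prefix_iff_eq_append.mp (List.isPrefixOf_iff_prefix.mp hpf)).symm
      · rw [pvPartition, if_neg hpf] at h
        injection h with h1 h2; injection h2 with h2a h2b
        subst h1; subst h2b
        have := ih _ _ (show pvPartition rest sep =
          ((pvPartition rest sep).1, true, (pvPartition rest sep).2.2) by rw [← h2a])
        conv_lhs => rw [this]
        simp

-- startswith as a proposition / its negation
theorem pv_startswith_true (l p : List Char) (h : p <+: l) : PySem.Chars.startswith l p = true :=
  (PySem.Chars.startswith_iff l p).mpr h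
theorem pv_startswith_false (l p : List Char) (h : ¬ p <+: l) :
    ¬ PySem.Chars.startswith l p = true :=
  fun hb => h ((PySem.Chars.startswith_iff l p).mp hb)

-- positive case: if url = scheme ++ "://" ++ host ++ "/" ++ t for an accepted scheme and host,
-- B returns pvTail t
theorem pvB_pos (t : List Char) (sch hostl : List Char)
    (hch : ':' ∉ sch) (hsh : '/' ∉ hostl)
    (hscheme : ¬ (sch ≠ "http".toList ∧ sch ≠ "https".toList))
    (hhost : ¬ (hostl ≠ "twitter.com".toList ∧ hostl ≠ "x.com".toList))
    (url : String) (hurl : url.toList = sch ++ (':' :: "//".toList) ++ (hostl ++ ('/' :: []) ++ t)) :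
    extract_handle_py_alt url = pvTail t := by
  have h1 : pvPartition url.toList "://".toList = (sch, true, hostl ++ ('/' :: []) ++ t) := by
    rw [hurl]; exact pvPartition_of_prefix sch _ _ ':' hch
  have h2 : pvPartition (hostl ++ ('/' :: []) ++ t) ('/' :: []) = (hostl, true, t) :=
    pvPartition_of_prefix hostl t [] '/' hsh
  unfold extract_handle_py_alt
  rw [h1]
  simp only [show ("/".toList : List Char) = '/' :: [] from rfl, h2]
  rw [if_neg (not_or.mpr ⟨by simp, hscheme⟩), if_neg (not_or.mpr ⟨by simp, hhost⟩)]

theorem extract_handle_py_spec' (url : String) :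
    extract_handle_py url = extract_handle_py_alt url := by
  set l := url.toList with hl
  by_cases h1 : "https://twitter.com/".toList <+: l
  · rcases h1 with ⟨t, ht⟩
    have hA : extract_handle_py url = pvTail t := by
      unfold extract_handle_py
      simp only [pvLoopA]
      rw [if_neg (by rw [← hl, ← ht]; simp), ← hl,
        if_pos (pv_startswith_true l _ ⟨t, ht⟩), ← ht]
      simp
    rw [hA, pvB_pos t "https".toList "twitter.com".toList (by decide) (by decide)
      (by simp) (by simp) url (by rw [← hl, ← ht]; rfl)]
  · by_cases h2 : "https://x.com/".toList <+: l
    · rcases h2 with ⟨t, ht⟩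
      have hA : extract_handle_py url = pvTail t := by
        unfold extract_handle_py
        simp only [pvLoopA]
        rw [if_neg (by rw [← hl, ← ht]; simp), ← hl,
          if_neg (pv_startswith_false l _ h1), if_pos (pv_startswith_true l _ ⟨t, ht⟩), ← ht]
        simp
      rw [hA, pvB_pos t "https".toList "x.com".toList (by decide) (by decide)
        (by simp) (by simp) url (by rw [← hl, ← ht]; rfl)]
    · by_cases h3 : "http://twitter.com/".toList <+: l
      · rcases h3 with ⟨t, ht⟩
        have hA : extract_handle_py url = pvTail t := by
          unfold extract_handle_py
          simp only [pvLoopA]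
          rw [if_neg (by rw [← hl, ← ht]; simp), ← hl,
            if_neg (pv_startswith_false l _ h1), if_neg (pv_startswith_false l _ h2),
            if_pos (pv_startswith_true l _ ⟨t, ht⟩), ← ht]
          simp
        rw [hA, pvB_pos t "http".toList "twitter.com".toList (by decide) (by decide)
          (by simp) (by simp) url (by rw [← hl, ← ht]; rfl)]
      · by_cases h4 : "http://x.com/".toList <+: l
        · rcases h4 with ⟨t, ht⟩
          have hA : extract_handle_py url = pvTail t := by
            unfold extract_handle_py
            simp only [pvLoopA]
            rw [if_neg (by rw [← hl, ← ht]; simp), ← hl,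
              if_neg (pv_startswith_false l _ h1), if_neg (pv_startswith_false l _ h2),
              if_neg (pv_startswith_false l _ h3), if_pos (pv_startswith_true l _ ⟨t, ht⟩), ← ht]
            simp
          rw [hA, pvB_pos t "http".toList "x.com".toList (by decide) (by decide)
            (by simp) (by simp) url (by rw [← hl, ← ht]; rfl)]
        · -- no prefix matches: A returns none, and so must B
          have hA : extract_handle_py url = none := by
            unfold extract_handle_py
            simp only [pvLoopA]
            by_cases hnil : url.toList = []
            · rw [if_pos hnil]
            · rw [if_neg hnil, ← hl,
                if_neg (pv_startswith_false l _ h1), if_neg (pv_startswith_false l _ h2),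
                if_neg (pv_startswith_false l _ h3), if_neg (pv_startswith_false l _ h4)]
          rw [hA]
          unfold extract_handle_py_alt
          rcases hm1 : pvPartition url.toList "://".toList with ⟨sch, f1, rest⟩
          by_cases hf1 : f1 = false ∨ (sch ≠ "http".toList ∧ sch ≠ "https".toList)
          · simp only [if_pos hf1]
          · simp only [if_neg hf1]
            have hschm : sch = "http".toList ∨ sch = "https".toList := by tauto
            have hft : f1 = true := by cases f1 <;> tauto
            subst hft
            have hdec : l = sch ++ "://".toList ++ rest := hl ▸ pvPartition_sound _ _ _ _ hm1
            rcases hm2 : pvPartition rest "/".toList with ⟨hostl, f2, path⟩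
            by_cases hf2 : f2 = false ∨ (hostl ≠ "twitter.com".toList ∧ hostl ≠ "x.com".toList)
            · simp only [if_pos hf2]
            · exfalso
              have hhostm : hostl = "twitter.com".toList ∨ hostl = "x.com".toList := by tauto
              have hft2 : f2 = true := by cases f2 <;> tauto
              subst hft2
              have hdec2 : rest = hostl ++ "/".toList ++ path := pvPartition_sound _ _ _ _ hm2
              rw [hdec2] at hdec
              rcases hschm with hs | hs <;> rcases hhostm with hh | hh <;>
                subst hs <;> subst hh
              · exact h3 ⟨path, by rw [hdec]; rfl⟩
              · exact h4 ⟨path, by rw [hdec]; rfl⟩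
              · exact h1 ⟨path, by rw [hdec]; rfl⟩
              · exact h2 ⟨path, by rw [hdec]; rfl⟩

-- ===== VERDICT (by name: the statement is the Claim_ definition above) =====
theorem extract_handle_py_spec : Claim_equal_extract_handle_py := by
  intro url _
  exact extract_handle_py_spec' url
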